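-- pv_equiv track=rewrite | github.com/ajblog/algorithm | test.py | calc_dislocation
-- ===== SOURCE A (Python) =====
-- def calc_dislocation(perm):
--     indexed_perm = []
--     for i in range(0, len(perm)):
--         indexed_perm.append((perm[i], i))
--     indexed_perm.sort()
--     dislocation = 0
--     for i in range(0, len(indexed_perm)):
--         dislocation += abs(indexed_perm[i][1] - i)
--     return dislocation
-- ===== SOURCE B (Python) =====
-- def calc_dislocation(perm):
--     counts = {}
--     for v in perm:
--         counts[v] = counts.get(v, 0) + 1
--     start = {}
--     acc = 0
--     for v in sorted(counts):
--         start[v] = acc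
--         acc += counts[v]
--     seen = {}
--     total = 0
--     for i, v in enumerate(perm):
--         s = seen.get(v, 0)
--         total += abs(i - (start[v] + s))
--         seen[v] = s + 1
--     return total
-- ===== Notes on version B (the rewrite author's own statement) =====
-- stated objective: alternative
-- what changed: B never sorts (value,index) pairs: it builds a value counter dict, computes prefix-sum start offsets over the sorted distinct values, and obtains each element's sorted position as start[value] + (running duplicate counter) in one streaming pass, summing |i - rank| directly.
import Mathlib
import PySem

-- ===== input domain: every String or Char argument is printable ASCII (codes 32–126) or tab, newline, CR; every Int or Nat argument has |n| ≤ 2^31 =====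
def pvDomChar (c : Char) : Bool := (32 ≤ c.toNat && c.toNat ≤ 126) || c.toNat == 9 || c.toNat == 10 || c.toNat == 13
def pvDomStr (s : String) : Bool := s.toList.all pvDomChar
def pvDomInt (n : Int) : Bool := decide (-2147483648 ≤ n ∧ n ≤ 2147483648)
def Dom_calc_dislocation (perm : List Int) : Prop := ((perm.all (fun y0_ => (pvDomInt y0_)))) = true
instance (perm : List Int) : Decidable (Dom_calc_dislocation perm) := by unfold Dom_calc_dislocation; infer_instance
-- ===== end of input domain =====

-- B replaces A's sort of (value, index) pairs by counting-sort-style rank computation: a value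
-- counter, prefix-sum start offsets over the sorted distinct values, and one streaming pass with a
-- duplicate counter (objective: alternative; same value, no (value, index) tuples are ever sorted).

-- ===== PORT A =====
def calc_dislocation (perm : List Int) : Int :=
  let indexed_perm := (PySem.List.pyRange 0 (perm.length : Int) 1).foldl
      (fun acc i => acc ++ [(PySem.List.pyGetD perm i 0, i)]) []
  let sortedp := PySem.List.sorted2 indexed_perm (fun p => p.1) (fun p => p.2)
  (PySem.List.pyRange 0 (sortedp.length : Int) 1).foldl
      (fun acc i => acc + |(PySem.List.pyGetD sortedp i (0, 0)).2 - i|) 0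

-- ===== PORT B =====
def calc_dislocation_alt (perm : List Int) : Int :=
  let counts := perm.foldl (fun d v => d.insert v (d.getD v 0 + 1)) PySem.Dict.empty
  let sa := (PySem.List.sorted counts.keys (fun v => v)).foldl
      (fun (p : PySem.Dict Int Int × Int) v => (p.1.insert v p.2, p.2 + counts.getD v 0))
      (PySem.Dict.empty, 0)
  let start := sa.1
  ((PySem.List.enumerate perm).foldl
      (fun (p : PySem.Dict Int Int × Int) iv =>
        let s := p.1.getD iv.2 0
        (p.1.insert iv.2 (s + 1), p.2 + |iv.1 - (start.getD iv.2 0 + s)|))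
      (PySem.Dict.empty, 0)).2

-- ===== PRECONDITION & SPEC =====
def Spec_calc_dislocation (perm : List Int) (out : Int) : Prop := out = calc_dislocation_alt perm
instance (perm : List Int) (out : Int) : Decidable (Spec_calc_dislocation perm out) := by unfold Spec_calc_dislocation; infer_instance

-- ===== CLAIM (what is proved, stated in full; the proofs are below) =====
def Claim_equal_calc_dislocation : Prop := ∀ (perm : List Int), Dom_calc_dislocation perm → Spec_calc_dislocation perm (calc_dislocation perm)

-- ===== LEMMAS AND PROOFS =====

-- insertBy with the lexicographic pair order agrees with insertBy with the key-only (stable)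
-- order, mapped through (k ·, ·), once every element present has a smaller index than the inserted one
lemma pv_insert_map (k : Int → Int) (i : Int) (acc : List Int)
    (h : ∀ j ∈ acc, ¬ i < j) :
    PySem.List.insertBy
        (fun a b => decide ((a : Int × Int).1 < b.1) || (!decide (b.1 < a.1) && decide (a.2 < b.2)))
        (k i, i) (acc.map (fun j => (k j, j)))
    = (PySem.List.insertBy (fun a b => decide (k a < k b)) i acc).map (fun j => (k j, j)) := by
  induction acc with
  | nil => simp [PySem.List.insertBy]
  | cons j rest ih =>
    have hij : ¬ i < j := h j (by simp)
    by_cases hkij : k i < k j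
    · simp [PySem.List.insertBy, hkij]
    · simp [PySem.List.insertBy, hkij, hij, ih (fun a ha => h a (by simp [ha]))]

lemma pv_fold_map (k : Int → Int) :
    ∀ (is acc : List Int), is.Pairwise (· < ·) →
    (∀ j ∈ acc, ∀ i ∈ is, j < i) →
    List.foldl
      (fun a x => PySem.List.insertBy
        (fun a b => decide ((a : Int × Int).1 < b.1) || (!decide (b.1 < a.1) && decide (a.2 < b.2))) x a)
      (acc.map (fun j => (k j, j))) (is.map (fun j => (k j, j)))
    = (List.foldl (fun a x => PySem.List.insertBy (fun a b => decide (k a < k b)) x a) acc is).map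
        (fun j => (k j, j)) := by
  intro is
  induction is with
  | nil => intro acc _ _; simp
  | cons i is ih =>
    intro acc hp hacc
    simp only [List.map_cons, List.foldl_cons]
    rw [pv_insert_map k i acc (fun j hj => by have := hacc j hj i (by simp); omega)]
    apply ih
    · exact hp.of_cons
    · intro j hj i' hi'
      rcases (PySem.List.mem_insertBy _ _ _ _).mp hj with h1 | h2
      · subst h1; exact (List.pairwise_cons.mp hp).1 i' hi'
      · exact hacc j h2 i' (by simp [hi'])

-- A's sort of (value, index) pairs equals the stable index sort, mapped back to pairs
lemma pv_sorted2_map (perm : List Int) (is : List Int) (h : is.Pairwise (· < ·)) :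
    PySem.List.sorted2 (is.map (fun i => (PySem.List.pyGetD perm i 0, i))) (fun p => p.1) (fun p => p.2)
    = (PySem.List.sorted is (fun i => PySem.List.pyGetD perm i 0)).map
        (fun i => (PySem.List.pyGetD perm i 0, i)) := by
  have := pv_fold_map (fun i => PySem.List.pyGetD perm i 0) is [] h (by simp)
  simpa [PySem.List.sorted2, PySem.List.sorted_eq_foldl_insertBy] using this

-- stable insertion of a fresh largest index preserves the strict (key, index) pairwise order
lemma pv_insert_pairwise (k : Int → Int) (i : Int) (acc : List Int)
    (hp : acc.Pairwise (fun a b => k a < k b ∨ (k a = k b ∧ a < b)))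
    (hlt : ∀ j ∈ acc, j < i) :
    (PySem.List.insertBy (fun a b => decide (k a < k b)) i acc).Pairwise
      (fun a b => k a < k b ∨ (k a = k b ∧ a < b)) := by
  induction acc with
  | nil => simp [PySem.List.insertBy]
  | cons y ys ih =>
    rcases List.pairwise_cons.mp hp with ⟨hy, hys⟩
    by_cases hk : k i < k y
    · simp only [PySem.List.insertBy, hk, decide_true, if_true]
      refine List.pairwise_cons.mpr ⟨?_, hp⟩
      intro z hz
      rcases List.mem_cons.mp hz with hz | hz
      · subst hz; exact Or.inl hk
      · rcases hy z hz with h1 | h2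
        · exact Or.inl (lt_trans hk h1)
        · exact Or.inl (by omega)
    · simp only [PySem.List.insertBy, hk, decide_false]
      refine List.pairwise_cons.mpr ⟨?_, ih hys (fun j hj => hlt j (by simp [hj]))⟩
      intro z hz
      rcases (PySem.List.mem_insertBy _ _ _ _).mp hz with h1 | h2
      · subst h1
        rcases lt_or_eq_of_le (le_of_not_gt hk) with h | h
        · exact Or.inl h
        · exact Or.inr ⟨h, hlt y (by simp)⟩
      · exact hy z h2

lemma pv_fold_pairwise (k : Int → Int) :
    ∀ (is acc : List Int), is.Pairwise (· < ·) →
    acc.Pairwise (fun a b => k a < k b ∨ (k a = k b ∧ a < b)) →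
    (∀ j ∈ acc, ∀ i ∈ is, j < i) →
    (List.foldl (fun a x => PySem.List.insertBy (fun a b => decide (k a < k b)) x a) acc is).Pairwise
      (fun a b => k a < k b ∨ (k a = k b ∧ a < b)) := by
  intro is
  induction is with
  | nil => intro acc _ h _; simpa using h
  | cons i is ih =>
    intro acc hp hacc hbound
    simp only [List.foldl_cons]
    apply ih
    · exact hp.of_cons
    · exact pv_insert_pairwise k i acc hacc (fun j hj => hbound j hj i (by simp))
    · intro j hj i' hi'
      rcases (PySem.List.mem_insertBy _ _ _ _).mp hj with h1 | h2
      · subst h1; exact (List.pairwise_cons.mp hp).1 i' hi'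
      · exact hbound j h2 i' (by simp [hi'])

-- in a strictly (key, index)-ordered list, the number of elements smaller than l[p] is p
lemma pv_count_at (k : Int → Int) (l : List Int)
    (hp : l.Pairwise (fun a b => k a < k b ∨ (k a = k b ∧ a < b)))
    (p : Nat) (hl : p < l.length) (v : Int) (hv : l[p] = v) :
    l.countP (fun j => decide (k j < k v ∨ (k j = k v ∧ j < v))) = p := by
  have hidx := List.pairwise_iff_getElem.mp hp
  conv_lhs => rw [← List.take_append_drop p l]
  rw [List.countP_append]
  have h1 : (l.take p).countP (fun j => decide (k j < k v ∨ (k j = k v ∧ j < v)))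
      = (l.take p).length := by
    rw [List.countP_eq_length]
    intro a ha
    rcases List.mem_iff_getElem.mp ha with ⟨q, hq, rfl⟩
    have hq' : q < p := by simp only [List.length_take] at hq; omega
    rw [List.getElem_take]
    have := hidx q p (by omega) hl hq'
    rw [hv] at this
    simpa using this
  have h2 : (l.drop p).countP (fun j => decide (k j < k v ∨ (k j = k v ∧ j < v))) = 0 := by
    rw [List.countP_eq_zero]
    intro a ha
    rcases List.mem_iff_getElem.mp ha with ⟨q, hq, rfl⟩
    rw [List.getElem_drop]
    rcases Nat.eq_zero_or_pos q with hq0 | hq0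
    · subst hq0
      simp [hv]
    · have hlt : p + q < l.length := by
        have := hq; simp only [List.length_drop] at this; omega
      have := hidx p (p + q) hl hlt (by omega)
      rw [hv] at this
      simp only [decide_eq_true_eq]
      rcases this with h | h
      · omega
      · omega
  rw [h1, h2, List.length_take]
  omega

lemma pv_map_eq_map_range (h : Int → Int) (os : List Int) :
    os.map h = (List.range os.length).map (fun p => h (os.getD p 0)) := by
  apply List.ext_getElem
  · simp
  · intro i p q
    simp only [List.getElem_map, List.getElem_range]
    rw [List.getD_eq_getElem _ _ (by simpa using p)]

-- fold building the start-offset dict never revisits a key absent from the key list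
lemma pv_start_untouched (cnt : Int → Int) :
    ∀ (K : List Int) (d : PySem.Dict Int Int) (acc v : Int), v ∉ K →
    ((K.foldl (fun p w => (p.1.insert w p.2, p.2 + cnt w)) (d, acc)).1).getD v 0 = d.getD v 0 := by
  intro K
  induction K with
  | nil => intro d acc v _; rfl
  | cons w t ih =>
    intro d acc v hv
    simp only [List.foldl_cons]
    have hvt : v ∉ t := by intro h; exact hv (List.mem_cons.mpr (Or.inr h))
    have hvw : v ≠ w := by intro h; exact hv (List.mem_cons.mpr (Or.inl h))
    rw [ih _ _ _ hvt]
    exact PySem.Dict.getD_insert_of_ne _ _ _ hvw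

-- the start-offset dict maps each key to the accumulated counts of the strictly smaller keys
lemma pv_start_getD (cnt : Int → Int) :
    ∀ (K : List Int) (d : PySem.Dict Int Int) (acc v : Int),
    K.Pairwise (· < ·) → v ∈ K →
    ((K.foldl (fun p w => (p.1.insert w p.2, p.2 + cnt w)) (d, acc)).1).getD v 0
      = acc + ((K.filter (fun w => decide (w < v))).map cnt).sum := by
  intro K
  induction K with
  | nil => intro d acc v _ hv; simp at hv
  | cons w t ih =>
    intro d acc v hp hv
    obtain ⟨hw, ht⟩ := List.pairwise_cons.mp hp
    simp only [List.foldl_cons]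
    rcases List.mem_cons.mp hv with rfl | hv'
    · rw [pv_start_untouched cnt t _ _ _ (fun h => lt_irrefl v (hw v h))]
      rw [PySem.Dict.getD_insert_self]
      have hf : (v :: t).filter (fun u => decide (u < v)) = [] := by
        rw [List.filter_cons]
        simp only [lt_irrefl, decide_false]
        exact List.filter_eq_nil_iff.mpr (fun u hu => by simp [not_lt.mpr (le_of_lt (hw u hu))])
      rw [hf]; simp
    · rw [ih _ _ _ ht hv']
      have hwv : w < v := lt_of_lt_of_le (hw v hv') (le_refl v)
      rw [List.filter_cons]
      simp only [hwv, decide_true, if_true, List.map_cons, List.sum_cons]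
      ring

-- a count of a disjunction splits when the disjuncts are disjoint
lemma pv_countP_or (l : List Nat) (p q : Nat → Prop) [DecidablePred p] [DecidablePred q]
    (h : ∀ x ∈ l, ¬ (p x ∧ q x)) :
    l.countP (fun x => decide (p x ∨ q x))
      = l.countP (fun x => decide (p x)) + l.countP (fun x => decide (q x)) := by
  induction l with
  | nil => simp
  | cons a t ih =>
    simp only [List.countP_cons]
    rw [ih (fun x hx => h x (by simp [hx]))]
    have hd := h a (by simp)
    by_cases hp : p a <;> by_cases hq : q a
    · exact absurd ⟨hp, hq⟩ hd
    · simp [hp, hq]; omega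
    · simp [hp, hq]; omega
    · simp [hp, hq]

lemma pv_self_eq_range_map (l : List Int) :
    (List.range l.length).map (fun j => l.getD j 0) = l := by
  apply List.ext_getElem
  · simp
  · intro i p q
    simp only [List.getElem_map, List.getElem_range]
    rw [List.getD_eq_getElem _ _ (by simpa using p)]

lemma pv_take_eq_range_map (l : List Int) (k : Nat) (hk : k ≤ l.length) :
    (List.range k).map (fun j => l.getD j 0) = l.take k := by
  apply List.ext_getElem
  · simp [List.length_take]; omega
  · intro i p q
    simp only [List.getElem_map, List.getElem_range, List.getElem_take]
    rw [List.getD_eq_getElem _ _ (by simp at q; omega)]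

-- the streaming pass: running duplicate counter + start offsets, as a closed sum
lemma pv_seen_loop (start : PySem.Dict Int Int) :
    ∀ (xs pref : List Int) (total : Int),
    ((PySem.List.enumerate xs ((pref.length : Nat) : Int)).foldl
       (fun (p : PySem.Dict Int Int × Int) iv =>
         (p.1.insert iv.2 (p.1.getD iv.2 0 + 1),
          p.2 + |iv.1 - (start.getD iv.2 0 + p.1.getD iv.2 0)|))
       (pref.foldl (fun d x => d.insert x (d.getD x 0 + 1)) PySem.Dict.empty, total)).2
    = total + ((List.range xs.length).map (fun k =>
         |((pref.length + k : Nat) : Int)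
           - (start.getD (xs.getD k 0) 0 + ((pref ++ xs.take k).count (xs.getD k 0) : Int))|)).sum := by
  intro xs
  induction xs with
  | nil => intro pref total; simp [PySem.List.enumerate_nil]
  | cons x xs ih =>
    intro pref total
    simp only [PySem.List.enumerate_cons, List.foldl_cons]
    rw [PySem.Dict.getD_foldl_insert_add_one pref PySem.Dict.empty x]
    have hd : (pref.foldl (fun d x => d.insert x (d.getD x 0 + 1)) PySem.Dict.empty).insert x
        (PySem.Dict.empty.getD x 0 + (pref.count x : Int) + 1)
        = (pref ++ [x]).foldl (fun d x => d.insert x (d.getD x 0 + 1)) PySem.Dict.empty := by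
      rw [List.foldl_append]
      simp only [List.foldl_cons, List.foldl_nil]
      rw [PySem.Dict.getD_foldl_insert_add_one pref PySem.Dict.empty x]
    have hs : ((pref.length : Nat) : Int) + 1 = (((pref ++ [x]).length : Nat) : Int) := by
      simp [List.length_append]
    rw [hd, hs, ih (pref ++ [x])]
    simp only [List.length_cons, List.range_succ_eq_map, List.map_cons, List.sum_cons,
      List.map_map]
    rw [show ((List.range xs.length).map
        (fun k => |(((pref ++ [x]).length + k : Nat) : Int)
          - (start.getD (xs.getD k 0) 0 + (((pref ++ [x]) ++ xs.take k).count (xs.getD k 0) : Int))|))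
      = ((List.range xs.length).map ((fun k =>
          |((pref.length + k : Nat) : Int)
            - (start.getD ((x :: xs).getD k 0) 0
              + ((pref ++ (x :: xs).take k).count ((x :: xs).getD k 0) : Int))|) ∘ Nat.succ)) from ?_]
    · simp only [List.getD_cons_zero, List.take_zero, List.append_nil, Nat.add_zero,
        PySem.Dict.getD_empty, zero_add]
      ring
    · apply List.map_congr_left
      intro k _
      simp only [Function.comp_apply, List.getD_cons_succ, List.take_succ_cons]
      have h1 : ((pref ++ [x]).length + k : Nat) = (pref.length + (k + 1) : Nat) := by
        simp [List.length_append]; omega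
      have h2 : (pref ++ [x]) ++ xs.take k = pref ++ (x :: xs.take k) := by
        simp [List.append_assoc]
      rw [h1, h2]

-- the sorted-positions count splits into smaller-value count plus earlier-equal count
lemma pv_rank_split (perm : List Int) (k : Nat) (hk : k < perm.length) :
    (PySem.List.pyRange 0 (perm.length : Int) 1).countP
        (fun j => decide (PySem.List.pyGetD perm j 0 < perm.getD k 0
          ∨ (PySem.List.pyGetD perm j 0 = perm.getD k 0 ∧ j < (k : Int))))
    = perm.countP (fun x => decide (x < perm.getD k 0))
      + (perm.take k).count (perm.getD k 0) := by
  set v := perm.getD k 0 with hv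
  rw [PySem.List.pyRange_zero_natCast, List.countP_map]
  have hcomp : ((fun j => decide (PySem.List.pyGetD perm j 0 < v
        ∨ (PySem.List.pyGetD perm j 0 = v ∧ j < (k : Int)))) ∘ (fun m : Nat => (m : Int)))
      = fun j : Nat => decide (perm.getD j 0 < v
        ∨ (perm.getD j 0 = v ∧ j < k)) := by
    funext j
    simp [Function.comp, PySem.List.pyGetD_natCast]
  rw [hcomp]
  rw [pv_countP_or (List.range perm.length)
      (fun j => perm.getD j 0 < v)
      (fun j => perm.getD j 0 = v ∧ j < k)
      (by intro x _ h
          have h1 : perm.getD x 0 < v := h.1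
          have h2 : perm.getD x 0 = v ∧ x < k := h.2
          omega)]
  congr 1
  · conv_rhs => rw [show perm = (List.range perm.length).map (fun j => perm.getD j 0) from
      (pv_self_eq_range_map perm).symm]
    rw [List.countP_map]
    rfl
  · rw [show perm.length = k + (perm.length - k) from by omega, List.range_add,
      List.countP_append]
    have h0 : (List.map (fun x => k + x) (List.range (perm.length - k))).countP
        (fun j => decide (perm.getD j 0 = v ∧ j < k)) = 0 := by
      rw [List.countP_eq_zero]
      intro a ha
      rcases List.mem_map.mp ha with ⟨b, _, rfl⟩
      simp
    rw [h0, Nat.add_zero]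
    rw [List.countP_congr (q := fun j => decide (perm.getD j 0 = v))
      (fun j hj => by
        simp only [List.mem_range] at hj
        simp only [decide_eq_true_eq]
        exact ⟨fun h => h.1, fun h => ⟨h, hj⟩⟩)]
    rw [show (fun j : Nat => decide (perm.getD j 0 = v))
        = (fun x : Int => decide (x = v)) ∘ (fun j => perm.getD j 0) from rfl]
    rw [← List.countP_map, pv_take_eq_range_map perm k (le_of_lt hk)]
    rw [List.count_eq_countP]
    apply List.countP_congr
    intro x _
    simp

-- sum of counts of the distinct smaller values = count of smaller elements
lemma pv_filter_sum_countP (perm : List Int) (v : Int) :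
    (((PySem.List.sorted (PySem.Set.ofList perm) (fun v => v)).filter
        (fun w => decide (w < v))).map (fun w => ((perm.count w : Nat) : Int))).sum
    = ((perm.countP (fun x => decide (x < v)) : Nat) : Int) := by
  have hK : (PySem.List.sorted (PySem.Set.ofList perm) (fun v => v)).Nodup :=
    (PySem.List.sorted_ofList_pairwise_lt perm).imp (fun h => ne_of_lt h)
  have hperm : ((PySem.List.sorted (PySem.Set.ofList perm) (fun v => v)).filter
        (fun w => decide (w < v))).Perm (perm.dedup.filter (fun w => decide (w < v))) := by
    rw [List.perm_ext_iff_of_nodup (hK.filter _) (perm.nodup_dedup.filter _)]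
    intro a
    simp [List.mem_filter, PySem.List.mem_sorted, PySem.Set.mem_ofList, List.mem_dedup]
  rw [(hperm.map _).sum_eq]
  rw [show (fun w => ((perm.count w : Nat) : Int))
      = (fun c : Nat => (c : Int)) ∘ (fun w => perm.count w) from rfl]
  rw [← List.map_map, ← Nat.cast_list_sum]
  rw [show (fun w : Int => perm.count w) = (fun w : Int => List.count w perm) from rfl]
  rw [List.sum_map_count_dedup_filter_eq_countP]

lemma pv_sum_pyRange (n : Nat) (f : Int → Int) :
    ((PySem.List.pyRange 0 (n : Int) 1).map f).sum
      = ((List.range n).map (fun k : Nat => f (k : Int))).sum := by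
  rw [PySem.List.pyRange_zero_natCast, List.map_map]
  rfl

-- ===== VERDICT (by name: the statement is the Claim_ definition above) =====
theorem calc_dislocation_spec : Claim_equal_calc_dislocation := by
  intro perm _
  unfold Spec_calc_dislocation
  have hpw : (PySem.List.pyRange 0 (perm.length : Int) 1).Pairwise (· < ·) :=
    PySem.List.pairwise_lt_pyRange_one 0 (perm.length : Int)
  set R := PySem.List.pyRange 0 (perm.length : Int) 1 with hR
  set order := PySem.List.sorted R (fun i => PySem.List.pyGetD perm i 0) with horder
  have hRperm : order.Perm R := PySem.List.sorted_perm R (fun i => PySem.List.pyGetD perm i 0) false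
  have hord : order.Pairwise (fun a b => PySem.List.pyGetD perm a 0 < PySem.List.pyGetD perm b 0
      ∨ (PySem.List.pyGetD perm a 0 = PySem.List.pyGetD perm b 0 ∧ a < b)) := by
    rw [horder, PySem.List.sorted_eq_foldl_insertBy]
    exact pv_fold_pairwise (fun i => PySem.List.pyGetD perm i 0) R [] hpw (by simp) (by simp)
  -- A's value
  have hA : calc_dislocation perm
      = ((List.range order.length).map (fun p => |(order.getD p 0) - (p : Int)|)).sum := by
    simp only [calc_dislocation]
    rw [← hR, PySem.List.foldl_append_singleton_eq_map, List.nil_append,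
        pv_sorted2_map perm R hpw, ← horder]
    rw [PySem.List.foldl_add]
    rw [List.length_map, PySem.List.pyRange_one]
    simp only [List.map_map, Int.sub_zero, Int.toNat_natCast, zero_add]
    apply congrArg
    apply List.map_congr_left
    intro p hp
    have hp' : p < order.length := List.mem_range.mp hp
    simp only [Function.comp_apply]
    rw [PySem.List.pyGetD_natCast]
    rw [List.getD_eq_getElem _ _ (by simpa using hp'), List.getElem_map]
    rw [List.getD_eq_getElem _ _ hp']
  -- B's value: counter + start offsets + streaming pass, reduced to the rank counts
  have hB : calc_dislocation_alt perm
      = (R.map (fun i => |i - ((R.countP (fun j =>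
          decide (PySem.List.pyGetD perm j 0 < PySem.List.pyGetD perm i 0
            ∨ (PySem.List.pyGetD perm j 0 = PySem.List.pyGetD perm i 0 ∧ j < i)))) : Int)|)).sum := by
    simp only [calc_dislocation_alt]
    rw [PySem.Dict.foldl_insert_getD_add_one_eq_counter, PySem.Dict.keys_counter]
    set K2 := PySem.List.sorted (PySem.Set.ofList perm) (fun v => v) with hK2
    set SD := (K2.foldl (fun (p : PySem.Dict Int Int × Int) v =>
        (p.1.insert v p.2, p.2 + (PySem.Dict.counter perm).getD v 0))
        (PySem.Dict.empty, 0)).1 with hSD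
    have hseen := pv_seen_loop SD perm [] 0
    simp only [List.length_nil, Nat.cast_zero, List.foldl_nil, List.nil_append,
      zero_add] at hseen
    rw [hseen]
    conv_rhs => rw [hR]
    rw [pv_sum_pyRange perm.length (fun i => |i - (((PySem.List.pyRange 0 (perm.length : Int) 1).countP
        (fun j => decide (PySem.List.pyGetD perm j 0 < PySem.List.pyGetD perm i 0
          ∨ (PySem.List.pyGetD perm j 0 = PySem.List.pyGetD perm i 0 ∧ j < i)))) : Int)|)]
    apply congrArg
    apply List.map_congr_left
    intro p2 hp2
    have hk : p2 < perm.length := List.mem_range.mp hp2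
    simp only [PySem.List.pyGetD_natCast]
    rw [pv_rank_split perm p2 hk]
    have hvmem : perm.getD p2 0 ∈ perm := by
      rw [List.getD_eq_getElem _ _ hk]
      exact List.getElem_mem hk
    have hstart : SD.getD (perm.getD p2 0) 0
        = 0 + ((K2.filter (fun w => decide (w < perm.getD p2 0))).map
            (fun w => (PySem.Dict.counter perm).getD w 0)).sum := by
      rw [hSD]
      exact pv_start_getD (fun w => (PySem.Dict.counter perm).getD w 0) K2 PySem.Dict.empty 0
        (perm.getD p2 0) (by rw [hK2]; exact PySem.List.sorted_ofList_pairwise_lt perm)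
        (by rw [hK2, PySem.List.mem_sorted]; exact (PySem.Set.mem_ofList perm _).mpr hvmem)
    rw [hstart]
    rw [show (fun w : Int => (PySem.Dict.counter perm).getD w 0)
        = (fun w : Int => ((perm.count w : Nat) : Int)) from
      funext (fun w => PySem.Dict.getD_counter perm w)]
    rw [hK2, pv_filter_sum_countP perm (perm.getD p2 0)]
    push_cast
    ring_nf
  have hB2 : (R.map (fun i => |i - ((R.countP (fun j =>
          decide (PySem.List.pyGetD perm j 0 < PySem.List.pyGetD perm i 0
            ∨ (PySem.List.pyGetD perm j 0 = PySem.List.pyGetD perm i 0 ∧ j < i)))) : Int)|)).sum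
      = ((List.range order.length).map (fun p => |(order.getD p 0) - (p : Int)|)).sum := by
    rw [((hRperm.symm).map (fun i => |i - ((R.countP (fun j =>
          decide (PySem.List.pyGetD perm j 0 < PySem.List.pyGetD perm i 0
            ∨ (PySem.List.pyGetD perm j 0 = PySem.List.pyGetD perm i 0 ∧ j < i)))) : Int)|)).sum_eq]
    rw [pv_map_eq_map_range]
    apply congrArg
    apply List.map_congr_left
    intro p hp
    have hp' : p < order.length := List.mem_range.mp hp
    rw [List.getD_eq_getElem _ _ hp']
    rw [← hRperm.countP_eq,
        pv_count_at (fun i => PySem.List.pyGetD perm i 0) order hord p hp' order[p] rfl]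
  rw [hA, hB, hB2]
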